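-- pv_equiv track=rewrite | github.com/filiphanes/jmap-proxy-python | jmap/parse.py | preview
-- ===== SOURCE A (Python) =====
-- def preview(bodyValues):
--     for part in bodyValues.values():
--         if part['type'] == 'text/plain':
--             return part['value'][256:]
--     for part in bodyValues.values():
--         if part['type'] == 'text/html':
--             return htmltotext(part['value'])[256:]
--     return None
--
-- def htmltotext(html):
--     # TODO: remove html tags ...
--     return html
-- ===== SOURCE B (Python) =====
-- def htmltotext(html):
--     # TODO: remove html tags ...
--     return html
--
-- def preview(bodyValues):
--     html_part = None
--     for part in bodyValues.values():
--         t = part['type']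
--         if t == 'text/plain':
--             return part['value'][256:]
--         if t == 'text/html' and html_part is None:
--             html_part = part
--     if html_part is not None:
--         return htmltotext(html_part['value'])[256:]
--     return None
-- ===== Notes on version B (the rewrite author's own statement) =====
-- stated objective: simpler
-- what changed: Single pass that returns on the first text/plain part and records the first text/html part as a fallback candidate, replacing A's two sequential scans over bodyValues.values().
import Mathlib
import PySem

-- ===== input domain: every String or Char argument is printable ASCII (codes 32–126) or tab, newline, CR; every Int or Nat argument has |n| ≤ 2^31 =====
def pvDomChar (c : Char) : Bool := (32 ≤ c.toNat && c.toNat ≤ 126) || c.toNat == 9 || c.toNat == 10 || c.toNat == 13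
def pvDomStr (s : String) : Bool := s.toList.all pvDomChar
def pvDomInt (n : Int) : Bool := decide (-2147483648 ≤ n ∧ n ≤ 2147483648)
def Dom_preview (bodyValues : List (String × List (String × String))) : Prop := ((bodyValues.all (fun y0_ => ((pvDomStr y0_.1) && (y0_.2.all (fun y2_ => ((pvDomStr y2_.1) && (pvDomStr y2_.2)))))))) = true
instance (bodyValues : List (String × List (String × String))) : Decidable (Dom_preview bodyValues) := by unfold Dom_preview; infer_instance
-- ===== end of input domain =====

-- B is a single pass over bodyValues.values() (return on first text/plain, record first
-- text/html as fallback) instead of A's two sequential scans; same return value everywhere A returns.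

-- ===== PORT A =====
def htmltotextPort (html : String) : String := html

-- first loop of A: return part['value'][256:] at the first part whose type is 'text/plain'
def previewLoop1 (parts : List (PySem.Dict String String)) : Option String :=
  match parts with
  | [] => none
  | p :: rest =>
    if PySem.Dict.get? p "type" == some "text/plain" then
      some (PySem.Str.slice (PySem.Dict.getD p "value" "") (some 256) none)
    else previewLoop1 rest

-- second loop of A: htmltotext(part['value'])[256:] at the first 'text/html' part
def previewLoop2 (parts : List (PySem.Dict String String)) : Option String :=
  match parts with
  | [] => none
  | p :: rest =>
    if PySem.Dict.get? p "type" == some "text/html" then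
      some (PySem.Str.slice (htmltotextPort (PySem.Dict.getD p "value" "")) (some 256) none)
    else previewLoop2 rest

def preview (bodyValues : List (String × List (String × String))) : Option String :=
  let parts := (PySem.Dict.ofList bodyValues).values.map PySem.Dict.ofList
  match previewLoop1 parts with
  | some r => some r
  | none => previewLoop2 parts

-- ===== PORT B =====
-- single loop carrying the first recorded text/html part (html_part)
def previewLoopB (parts : List (PySem.Dict String String))
    (htmlPart : Option (PySem.Dict String String)) : Option String :=
  match parts with
  | [] =>
    match htmlPart with
    | some p => some (PySem.Str.slice (htmltotextPort (PySem.Dict.getD p "value" "")) (some 256) none)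
    | none => none
  | p :: rest =>
    let t := PySem.Dict.get? p "type"
    if t == some "text/plain" then
      some (PySem.Str.slice (PySem.Dict.getD p "value" "") (some 256) none)
    else if t == some "text/html" && htmlPart.isNone then
      previewLoopB rest (some p)
    else
      previewLoopB rest htmlPart

def preview_alt (bodyValues : List (String × List (String × String))) : Option String :=
  previewLoopB ((PySem.Dict.ofList bodyValues).values.map PySem.Dict.ofList) none

-- ===== PRECONDITION & SPEC =====
-- Pre_ excludes exactly the inputs where the Python A raises KeyError: a part without a
-- 'type' key reached before the first text/plain part, or a returning (first text/plain,
-- or — with no text/plain — first text/html) part without a 'value' key.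
def Pre_preview (bodyValues : List (String × List (String × String))) : Prop :=
  let parts := (PySem.Dict.ofList bodyValues).values.map PySem.Dict.ofList
  let pre := parts.takeWhile (fun p => PySem.Dict.get? p "type" != some "text/plain")
  if pre.length < parts.length then
    (∀ q ∈ pre, (PySem.Dict.get? q "type").isSome = true) ∧
    ((parts[pre.length]?.bind (fun p => PySem.Dict.get? p "value")).isSome = true)
  else
    (∀ q ∈ parts, (PySem.Dict.get? q "type").isSome = true) ∧
    (let pre2 := parts.takeWhile (fun p => PySem.Dict.get? p "type" != some "text/html")
     pre2.length = parts.length ∨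
       (parts[pre2.length]?.bind (fun p => PySem.Dict.get? p "value")).isSome = true)
instance (bodyValues : List (String × List (String × String))) : Decidable (Pre_preview bodyValues) := by
  unfold Pre_preview; infer_instance

def pvWitness_preview : (List (String × List (String × String))) :=
  [("1", [("type", "text/html"), ("value", "<p>hi</p>")]),
   ("2", [("type", "text/plain"), ("value", "hello")])]

def Spec_preview (bodyValues : List (String × List (String × String))) (out : Option String) : Prop := out = preview_alt bodyValues
instance (bodyValues : List (String × List (String × String))) (out : Option String) : Decidable (Spec_preview bodyValues out) := by unfold Spec_preview; infer_instance

-- ===== CLAIM (what is proved, stated in full; the proofs are below) =====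
def Claim_equal_preview : Prop := ∀ (bodyValues : List (String × List (String × String))), Dom_preview bodyValues → Pre_preview bodyValues → Spec_preview bodyValues (preview bodyValues)

-- ===== LEMMAS AND PROOFS =====

-- B's single loop equals A's first scan, falling back to the recorded part, then A's second scan.
theorem previewLoopB_eq (parts : List (PySem.Dict String String))
    (acc : Option (PySem.Dict String String)) :
    previewLoopB parts acc =
      match previewLoop1 parts with
      | some r => some r
      | none =>
        match acc with
        | some p => some (PySem.Str.slice (htmltotextPort (PySem.Dict.getD p "value" "")) (some 256) none)
        | none => previewLoop2 parts := by
  induction parts generalizing acc with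
  | nil => cases acc <;> rfl
  | cons p rest ih =>
    simp only [previewLoopB, previewLoop1, previewLoop2]
    by_cases hp : (PySem.Dict.get? p "type" == some "text/plain") = true
    · simp [hp]
    · simp only [hp]
      by_cases hh : (PySem.Dict.get? p "type" == some "text/html") = true
      · cases acc with
        | none => simp [hh, ih]
        | some q => simp [hh, ih]
      · simp [hh, ih]

-- ===== VERDICT (by name: the statement is the Claim_ definition above) =====
theorem preview_spec : Claim_equal_preview := by
  intro bodyValues _ _
  unfold Spec_preview preview preview_alt
  rw [previewLoopB_eq]
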